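-- pv_equiv track=rewrite | github.com/JohnnyHowe/python-scripts | godot/create_utility_folder_index.py | _parse_gdscript_parameters
-- ===== SOURCE A (Python) =====
-- def _parse_gdscript_parameters(parameters: str) -> list[tuple[str, str, str]]:
-- 	if parameters.strip() == "":
-- 		return []
--
-- 	parts = [part.strip() for part in parameters.split(",")]
-- 	parsed: list[tuple[str, str, str]] = []
--
-- 	for part in parts:
-- 		if part == "":
-- 			continue
--
-- 		default_value = ""
-- 		param_type = ""
--
-- 		if "=" in part:
-- 			left, default_value = part.split("=", maxsplit=1)
-- 			part = left.strip()
-- 			default_value = default_value.strip()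
--
-- 		if ":" in part:
-- 			name, param_type = part.split(":", maxsplit=1)
-- 			name = name.strip()
-- 			param_type = param_type.strip()
-- 		else:
-- 			name = part.strip()
--
-- 		parsed.append((name, param_type, default_value))
--
-- 	return parsed
-- ===== SOURCE B (Python) =====
-- def _parse_gdscript_parameters(parameters: str) -> list[tuple[str, str, str]]:
-- 	# Single left-to-right pass: a small state machine splits each comma-separated
-- 	# part into name/type/default buffers as characters arrive.
-- 	parsed: list[tuple[str, str, str]] = []
-- 	name = param_type = default_value = ""
-- 	mode = 0  # 0 = reading name, 1 = reading type, 2 = reading default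
-- 	seen = False  # part contains a non-whitespace character
-- 	for ch in parameters + ",":
-- 		if ch == ",":
-- 			if seen:
-- 				parsed.append((name.strip(), param_type.strip(), default_value.strip()))
-- 			name = param_type = default_value = ""
-- 			mode = 0
-- 			seen = False
-- 		else:
-- 			if not ch.isspace():
-- 				seen = True
-- 			if ch == "=" and mode < 2:
-- 				mode = 2
-- 			elif ch == ":" and mode == 0:
-- 				mode = 1
-- 			elif mode == 0:
-- 				name += ch
-- 			elif mode == 1:
-- 				param_type += ch
-- 			else:
-- 				default_value += ch
-- 	return parsed
-- ===== Notes on version B (the rewrite author's own statement) =====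
-- stated objective: alternative
-- what changed: Replaced the split(',')/strip/split('=')/split(':') cascade by a single left-to-right character scan: one state machine pass over the input accumulates name/type/default buffers per comma-separated part and flushes them at each comma.
import Mathlib
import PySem

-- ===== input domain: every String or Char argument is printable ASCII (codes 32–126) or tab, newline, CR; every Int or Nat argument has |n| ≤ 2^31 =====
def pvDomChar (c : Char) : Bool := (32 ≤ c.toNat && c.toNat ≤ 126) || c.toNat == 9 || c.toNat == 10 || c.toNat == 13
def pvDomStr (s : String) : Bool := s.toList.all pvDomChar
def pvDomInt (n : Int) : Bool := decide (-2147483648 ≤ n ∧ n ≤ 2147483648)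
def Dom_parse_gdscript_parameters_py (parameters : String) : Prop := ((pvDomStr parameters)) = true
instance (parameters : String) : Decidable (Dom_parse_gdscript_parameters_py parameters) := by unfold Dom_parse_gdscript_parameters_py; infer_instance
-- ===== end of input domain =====

-- B replaces A's split/strip cascade by a single character-scan state machine; equal output proved on all strings.

-- ===== PORT A =====
-- literal transliteration of A: strip-guard, split(","), per-part strip, then the
-- '='/':' first-occurrence split cascade; the loop body is factored out as pvCascadeA
-- (split(sep, maxsplit=1) = PySem.Chars.splitOnMax _ _ 1, "c" in s = PySem.Chars.isIn)
def pvCascadeA (part : List Char) : String × String × String :=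
  let default_value : List Char := []
  let param_type : List Char := []
  let (part, default_value) :=
    if PySem.Chars.isIn ['='] part then
      match PySem.Chars.splitOnMax part ['='] 1 with
      | [left, dv] => (PySem.Chars.strip left, PySem.Chars.strip dv)
      | _ => ([], [])
    else (part, default_value)
  let (name, param_type) :=
    if PySem.Chars.isIn [':'] part then
      match PySem.Chars.splitOnMax part [':'] 1 with
      | [nm, tp] => (PySem.Chars.strip nm, PySem.Chars.strip tp)
      | _ => ([], [])
    else (PySem.Chars.strip part, param_type)
  (String.ofList name, String.ofList param_type, String.ofList default_value)

def parse_gdscript_parameters_py (parameters : String) : List (String × String × String) :=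
  if PySem.Chars.strip parameters.toList = [] then []
  else
    let parts := (PySem.Chars.splitOn parameters.toList [',']).map PySem.Chars.strip
    parts.foldl (fun parsed part =>
      if part = [] then parsed else parsed ++ [pvCascadeA part]) []

-- ===== PORT B =====
-- one step of B's state machine; state = (parsed, name, param_type, default_value, mode, seen)
def pvStepB (st : List (String × String × String) × List Char × List Char × List Char × Nat × Bool)
    (ch : Char) : List (String × String × String) × List Char × List Char × List Char × Nat × Bool :=
  let (parsed, name, param_type, default_value, mode, seen) := st
  if ch = ',' then
    (if seen then
        parsed ++ [(String.ofList (PySem.Chars.strip name), String.ofList (PySem.Chars.strip param_type),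
                    String.ofList (PySem.Chars.strip default_value))]
      else parsed, [], [], [], 0, false)
  else
    let seen := seen || !PySem.Chars.isspace ch
    if ch = '=' ∧ mode < 2 then (parsed, name, param_type, default_value, 2, seen)
    else if ch = ':' ∧ mode = 0 then (parsed, name, param_type, default_value, 1, seen)
    else if mode = 0 then (parsed, name ++ [ch], param_type, default_value, mode, seen)
    else if mode = 1 then (parsed, name, param_type ++ [ch], default_value, mode, seen)
    else (parsed, name, param_type, default_value ++ [ch], mode, seen)

def parse_gdscript_parameters_py_alt (parameters : String) : List (String × String × String) :=
  ((parameters.toList ++ [',']).foldl pvStepB ([], [], [], [], 0, false)).1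

-- ===== PRECONDITION & SPEC =====
def Spec_parse_gdscript_parameters_py (parameters : String) (out : List (String × String × String)) : Prop := out = parse_gdscript_parameters_py_alt parameters
instance (parameters : String) (out : List (String × String × String)) : Decidable (Spec_parse_gdscript_parameters_py parameters out) := by unfold Spec_parse_gdscript_parameters_py; infer_instance

-- ===== CLAIM (what is proved, stated in full; the proofs are below) =====
def Claim_equal_parse_gdscript_parameters_py : Prop := ∀ (parameters : String), Dom_parse_gdscript_parameters_py parameters → Spec_parse_gdscript_parameters_py parameters (parse_gdscript_parameters_py parameters)

-- ===== LEMMAS AND PROOFS =====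

theorem pv_lstrip_cons_space (h : Char) (t : List Char) (hs : PySem.Chars.isspace h = true) :
    PySem.Chars.lstrip (h :: t) = PySem.Chars.lstrip t := by
  simp [PySem.Chars.lstrip, List.dropWhile_cons, hs]

theorem pv_lstrip_cons_nonspace (h : Char) (t : List Char) (hs : PySem.Chars.isspace h = false) :
    PySem.Chars.lstrip (h :: t) = h :: t := by
  simp [PySem.Chars.lstrip, List.dropWhile_cons, hs]

theorem pv_lstrip_append_cons (a b : List Char) (c : Char) (hc : PySem.Chars.isspace c = false) :
    PySem.Chars.lstrip (a ++ c :: b) = PySem.Chars.lstrip a ++ c :: b := by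
  simp only [PySem.Chars.lstrip, List.dropWhile_append]
  split_ifs with h
  · rw [List.isEmpty_iff] at h
    simp [List.dropWhile_cons, hc, h]
  · rfl

theorem pv_rstrip_append_cons (a b : List Char) (c : Char) (hc : PySem.Chars.isspace c = false) :
    PySem.Chars.rstrip (a ++ c :: b) = a ++ c :: PySem.Chars.rstrip b := by
  have hrev : (a ++ c :: b).reverse = b.reverse ++ c :: a.reverse := by simp
  simp only [PySem.Chars.rstrip, hrev, List.dropWhile_append]
  split_ifs with h
  · rw [List.isEmpty_iff] at h
    simp [List.dropWhile_cons, hc, h]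
  · simp

theorem pv_rstrip_cons (h : Char) (t : List Char) :
    PySem.Chars.rstrip (h :: t) =
      if PySem.Chars.rstrip t = [] then (if PySem.Chars.isspace h then [] else [h])
      else h :: PySem.Chars.rstrip t := by
  have : PySem.Chars.rstrip t = [] ↔ (List.dropWhile PySem.Chars.isspace t.reverse).isEmpty = true := by
    simp [PySem.Chars.rstrip, List.isEmpty_iff]
  simp only [PySem.Chars.rstrip, List.reverse_cons, List.dropWhile_append]
  split_ifs with h1 h2 h3 h4 <;>
    simp_all [PySem.Chars.rstrip, List.isEmpty_iff]

theorem pv_comm (p : List Char) :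
    PySem.Chars.lstrip (PySem.Chars.rstrip p) = PySem.Chars.rstrip (PySem.Chars.lstrip p) := by
  induction p with
  | nil => rfl
  | cons h t ih =>
    by_cases hs : PySem.Chars.isspace h = true
    · rw [pv_rstrip_cons, pv_lstrip_cons_space h t hs]
      split_ifs with h1
      · rw [← ih, h1]
      · rw [pv_lstrip_cons_space h _ hs, ih]
    · have hs' : PySem.Chars.isspace h = false := by simpa using hs
      rw [pv_lstrip_cons_nonspace h t hs', pv_rstrip_cons]
      simp only [hs', Bool.false_eq_true, if_false]
      split_ifs with h1
      · exact pv_lstrip_cons_nonspace h [] hs'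
      · exact pv_lstrip_cons_nonspace h _ hs'

theorem pv_lstrip_idem (p : List Char) :
    PySem.Chars.lstrip (PySem.Chars.lstrip p) = PySem.Chars.lstrip p := by
  simp [PySem.Chars.lstrip, List.dropWhile_idempotent]

theorem pv_rstrip_idem (p : List Char) :
    PySem.Chars.rstrip (PySem.Chars.rstrip p) = PySem.Chars.rstrip p := by
  simp [PySem.Chars.rstrip, List.dropWhile_idempotent]

theorem pv_strip_eq (p : List Char) :
    PySem.Chars.strip p = PySem.Chars.rstrip (PySem.Chars.lstrip p) := rfl

theorem pv_strip_lstrip (p : List Char) :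
    PySem.Chars.strip (PySem.Chars.lstrip p) = PySem.Chars.strip p := by
  rw [pv_strip_eq, pv_lstrip_idem]; rfl

theorem pv_strip_rstrip (p : List Char) :
    PySem.Chars.strip (PySem.Chars.rstrip p) = PySem.Chars.strip p := by
  rw [pv_strip_eq (PySem.Chars.rstrip p), pv_comm, pv_rstrip_idem]; rfl

theorem pv_strip_idem (p : List Char) :
    PySem.Chars.strip (PySem.Chars.strip p) = PySem.Chars.strip p := by
  rw [pv_strip_eq p, pv_strip_rstrip, pv_strip_lstrip]; exact pv_strip_eq p

theorem pv_mem_lstrip (p : List Char) (c : Char) (hc : PySem.Chars.isspace c = false) :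
    c ∈ PySem.Chars.lstrip p ↔ c ∈ p := by
  induction p with
  | nil => simp [PySem.Chars.lstrip]
  | cons h t ih =>
    by_cases hs : PySem.Chars.isspace h = true
    · rw [pv_lstrip_cons_space h t hs]
      have : c ≠ h := fun e => by rw [e] at hc; rw [hc] at hs; cases hs
      simp [this, ih]
    · rw [pv_lstrip_cons_nonspace h t (by simpa using hs)]

theorem pv_mem_rstrip (p : List Char) (c : Char) (hc : PySem.Chars.isspace c = false) :
    c ∈ PySem.Chars.rstrip p ↔ c ∈ p := by
  have := pv_mem_lstrip p.reverse c hc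
  simp only [PySem.Chars.rstrip, PySem.Chars.lstrip] at *
  simpa using this

theorem pv_mem_strip (p : List Char) (c : Char) (hc : PySem.Chars.isspace c = false) :
    c ∈ PySem.Chars.strip p ↔ c ∈ p := by
  rw [pv_strip_eq, pv_mem_rstrip _ c hc, pv_mem_lstrip _ c hc]

theorem pv_strip_eq_nil_iff (p : List Char) :
    PySem.Chars.strip p = [] ↔ (p.any fun ch => !PySem.Chars.isspace ch) = false := by
  constructor
  · intro h
    rw [List.any_eq_false]
    intro x hx
    by_contra hb
    have hx' : PySem.Chars.isspace x = false := by simpa using hb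
    rw [← pv_mem_strip p x hx'] at hx
    rw [h] at hx
    cases hx
  · intro h
    rw [List.any_eq_false] at h
    have hall : ∀ x ∈ p, PySem.Chars.isspace x = true := fun x hx => by simpa using h x hx
    have hl : PySem.Chars.lstrip p = [] := by
      unfold PySem.Chars.lstrip
      exact List.dropWhile_eq_nil_iff.mpr hall
    rw [pv_strip_eq, hl]; rfl

theorem pv_not_mem_takeWhile (p : List Char) (c : Char) : c ∉ p.takeWhile (· != c) := by
  intro h
  have := List.mem_takeWhile_imp h
  simp at this

theorem pv_dropWhile_mem (p : List Char) (c : Char) (h : c ∈ p) :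
    p.dropWhile (· != c) = c :: (p.dropWhile (· != c)).drop 1 := by
  induction p with
  | nil => cases h
  | cons a r ih =>
    by_cases ha : a = c
    · subst ha; simp [List.dropWhile_cons]
    · rw [List.dropWhile_cons]
      have : (a != c) = true := by simpa using ha
      rw [if_pos this]
      refine ih ?_
      rcases List.mem_cons.mp h with h' | h'
      · exact absurd h'.symm ha
      · exact h'

theorem pv_TW (x y : List Char) (c : Char) (hx : c ∉ x) :
    (x ++ c :: y).takeWhile (· != c) = x ∧ (x ++ c :: y).dropWhile (· != c) = c :: y := by
  induction x with
  | nil => simp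
  | cons a r ih =>
    have ha : (a != c) = true := by
      simp only [bne_iff_ne, ne_eq]
      exact fun e => hx (by simp [e])
    have := ih (fun hm => hx (List.mem_cons_of_mem a hm))
    simp [List.takeWhile_cons, List.dropWhile_cons, ha, this.1, this.2]

theorem pv_strip_decomp (p : List Char) (c : Char) (hc : PySem.Chars.isspace c = false)
    (h : c ∈ p) :
    PySem.Chars.strip p =
      PySem.Chars.lstrip (p.takeWhile (· != c)) ++
        c :: PySem.Chars.rstrip ((p.dropWhile (· != c)).drop 1) := by
  have hsplit : p = p.takeWhile (· != c) ++ (c :: (p.dropWhile (· != c)).drop 1) := by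
    conv_lhs => rw [← List.takeWhile_append_dropWhile (p := (· != c)) (l := p)]
    rw [← pv_dropWhile_mem p c h]
  calc PySem.Chars.strip p
      = PySem.Chars.rstrip (PySem.Chars.lstrip (p.takeWhile (· != c) ++ (c :: (p.dropWhile (· != c)).drop 1))) := by
        rw [pv_strip_eq, ← hsplit]
    _ = _ := by
        rw [pv_lstrip_append_cons _ _ c hc, pv_rstrip_append_cons _ _ c hc]

theorem pv_not_mem_lstrip {p : List Char} {c : Char} (h : c ∉ p) :
    c ∉ PySem.Chars.lstrip p := fun hm => h ((List.dropWhile_sublist _).mem hm)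

theorem pv_M2 (p : List Char) (c : Char) (hc : PySem.Chars.isspace c = false) :
    PySem.Chars.strip ((PySem.Chars.strip p).takeWhile (· != c)) =
      PySem.Chars.strip (p.takeWhile (· != c)) := by
  by_cases h : c ∈ p
  · rw [pv_strip_decomp p c hc h]
    have hnm : c ∉ PySem.Chars.lstrip (p.takeWhile (· != c)) :=
      pv_not_mem_lstrip (pv_not_mem_takeWhile p c)
    rw [(pv_TW _ _ c hnm).1, pv_strip_lstrip]
  · have h1 : c ∉ PySem.Chars.strip p := fun hm => h ((pv_mem_strip p c hc).mp hm)
    rw [List.takeWhile_eq_self_iff.mpr ?_, List.takeWhile_eq_self_iff.mpr ?_, pv_strip_idem]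
    · intro x hx
      simp only [bne_iff_ne, ne_eq]
      intro e; exact h (e ▸ hx)
    · intro x hx
      simp only [bne_iff_ne, ne_eq]
      intro e; exact h1 (e ▸ hx)

theorem pv_M3 (p : List Char) (c : Char) (hc : PySem.Chars.isspace c = false) :
    PySem.Chars.strip (((PySem.Chars.strip p).dropWhile (· != c)).drop 1) =
      PySem.Chars.strip ((p.dropWhile (· != c)).drop 1) := by
  by_cases h : c ∈ p
  · rw [pv_strip_decomp p c hc h]
    have hnm : c ∉ PySem.Chars.lstrip (p.takeWhile (· != c)) :=
      pv_not_mem_lstrip (pv_not_mem_takeWhile p c)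
    rw [(pv_TW _ _ c hnm).2]
    simp only [List.drop_one, List.tail_cons]
    rw [pv_strip_rstrip]
  · have h1 : c ∉ PySem.Chars.strip p := fun hm => h ((pv_mem_strip p c hc).mp hm)
    rw [List.dropWhile_eq_nil_iff.mpr ?_, List.dropWhile_eq_nil_iff.mpr ?_]
    · intro x hx
      simp only [bne_iff_ne, ne_eq]
      intro e; exact h (e ▸ hx)
    · intro x hx
      simp only [bne_iff_ne, ne_eq]
      intro e; exact h1 (e ▸ hx)

def pvParts (c : Char) : List Char → List (List Char)
  | [] => [[]]
  | a :: r =>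
    if a = c then [] :: pvParts c r
    else
      match pvParts c r with
      | [] => [[a]]
      | p :: ps => (a :: p) :: ps

theorem pv_pvParts_ne_nil (c : Char) (cs : List Char) : pvParts c cs ≠ [] := by
  cases cs with
  | nil => simp [pvParts]
  | cons a r =>
    simp only [pvParts]
    split_ifs
    · simp
    · cases pvParts c r <;> simp

theorem pv_splitOn_go_spec (c : Char) (l : List Char) :
    ∀ (fuel : Nat) (cur : List Char) (acc : List (List Char)), l.length ≤ fuel →
    PySem.Chars.splitOn.go [c] fuel l cur acc =
      acc.reverse ++
        (match pvParts c l with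
         | [] => []
         | p :: ps => (cur.reverse ++ p) :: ps) := by
  induction l with
  | nil =>
    intro fuel cur acc _
    cases fuel <;> simp [PySem.Chars.splitOn.go, pvParts]
  | cons a r ih =>
    intro fuel cur acc hf
    cases fuel with
    | zero => simp at hf
    | succ f =>
      have hr : r.length ≤ f := by simp at hf; omega
      rw [PySem.Chars.splitOn.go]
      by_cases hac : a = c
      · subst hac
        have hpre : List.isPrefixOf [a] (a :: r) = true := by simp [List.isPrefixOf]
        simp only [hpre, if_true, List.length_singleton, List.drop_succ_cons, List.drop_zero]
        rw [ih f [] (cur.reverse :: acc) hr]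
        simp only [pvParts, if_pos rfl]
        cases hp : pvParts a r with
        | nil => exact absurd hp (pv_pvParts_ne_nil a r)
        | cons p ps => simp
      · have hpre : List.isPrefixOf [c] (a :: r) = false := by
          simp [List.isPrefixOf]
          exact fun e => hac e.symm
        simp only [hpre, Bool.false_eq_true, if_false]
        rw [ih f (a :: cur) acc hr]
        simp only [pvParts, if_neg hac]
        cases hp : pvParts c r with
        | nil => exact absurd hp (pv_pvParts_ne_nil c r)
        | cons p ps => simp

theorem pv_splitOn_eq_pvParts (c : Char) (s : List Char) :
    PySem.Chars.splitOn s [c] = pvParts c s := by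
  rw [PySem.Chars.splitOn, pv_splitOn_go_spec c s (s.length + 1) [] [] (by omega)]
  cases hp : pvParts c s with
  | nil => exact absurd hp (pv_pvParts_ne_nil c s)
  | cons p ps => simp

theorem pv_splitOnMax_go_zero (c : Char) (l : List Char) (fuel : Nat) (cur : List Char)
    (acc : List (List Char)) :
    PySem.Chars.splitOnMax.go [c] fuel 0 l cur acc = acc.reverse ++ [cur.reverse ++ l] := by
  cases fuel with
  | zero => simp [PySem.Chars.splitOnMax.go]
  | succ f => cases l <;> simp [PySem.Chars.splitOnMax.go]

theorem pv_splitOnMax_go_one (c : Char) (l : List Char) :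
    ∀ (fuel : Nat) (cur : List Char), l.length ≤ fuel →
    PySem.Chars.splitOnMax.go [c] fuel 1 l cur [] =
      if c ∈ l then [cur.reverse ++ l.takeWhile (· != c), (l.dropWhile (· != c)).drop 1]
      else [cur.reverse ++ l] := by
  induction l with
  | nil =>
    intro fuel cur _
    cases fuel <;> simp [PySem.Chars.splitOnMax.go]
  | cons a r ih =>
    intro fuel cur hf
    cases fuel with
    | zero => simp at hf
    | succ f =>
      have hr : r.length ≤ f := by simp at hf; omega
      rw [PySem.Chars.splitOnMax.go]
      by_cases hac : a = c
      · subst hac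
        have hpre : List.isPrefixOf [a] (a :: r) = true := by simp [List.isPrefixOf]
        simp only [hpre, if_true, List.length_singleton, List.drop_succ_cons, List.drop_zero,
          Nat.one_ne_zero, if_false]
        rw [pv_splitOnMax_go_zero a r f [] [cur.reverse]]
        simp [List.dropWhile_cons, List.takeWhile_cons]
      · have hpre : List.isPrefixOf [c] (a :: r) = false := by
          simp [List.isPrefixOf]
          exact fun e => hac e.symm
        simp only [hpre, Bool.false_eq_true, if_false, Nat.one_ne_zero]
        rw [ih f (a :: cur) hr]
        have ha : (a != c) = true := by simpa using hac
        have hmem : c ∈ a :: r ↔ c ∈ r := by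
          rw [List.mem_cons]
          exact or_iff_right (fun e => hac e.symm)
        simp only [List.takeWhile_cons, List.dropWhile_cons, ha, if_pos, hmem, List.reverse_cons]
        split_ifs with h1 <;> simp

theorem pv_splitOnMax_one (q : List Char) (c : Char) :
    PySem.Chars.splitOnMax q [c] 1 =
      if c ∈ q then [q.takeWhile (· != c), (q.dropWhile (· != c)).drop 1] else [q] := by
  rw [PySem.Chars.splitOnMax, if_neg (by norm_num)]
  have h := pv_splitOnMax_go_one c q (q.length + 1) [] (by omega)
  simpa using h

theorem pv_isIn_singleton (c : Char) (s : List Char) :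
    PySem.Chars.isIn [c] s = true ↔ c ∈ s := by
  rw [PySem.Chars.isIn_iff_infix, List.singleton_infix_iff]

theorem pv_isIn_singleton_false (c : Char) (s : List Char) (h : c ∉ s) :
    PySem.Chars.isIn [c] s = false := by
  rw [← Bool.not_eq_true, pv_isIn_singleton]; exact h


def pvEmit (p : List Char) : String × String × String :=
  let l := p.takeWhile (· != '=')
  let d := (p.dropWhile (· != '=')).drop 1
  let n := l.takeWhile (· != ':')
  let t := (l.dropWhile (· != ':')).drop 1
  (String.ofList (PySem.Chars.strip n), String.ofList (PySem.Chars.strip t),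
   String.ofList (PySem.Chars.strip d))

theorem pv_colon (l : List Char) :
    (if PySem.Chars.isIn [':'] (PySem.Chars.strip l) then
       match PySem.Chars.splitOnMax (PySem.Chars.strip l) [':'] 1 with
       | [nm, tp] => (PySem.Chars.strip nm, PySem.Chars.strip tp)
       | _ => ([], [])
     else (PySem.Chars.strip (PySem.Chars.strip l), ([] : List Char)))
    = (PySem.Chars.strip (l.takeWhile (· != ':')),
       PySem.Chars.strip ((l.dropWhile (· != ':')).drop 1)) := by
  by_cases hm : ':' ∈ l
  · have hms : ':' ∈ PySem.Chars.strip l := (pv_mem_strip l ':' rfl).mpr hm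
    have hiin : PySem.Chars.isIn [':'] (PySem.Chars.strip l) = true :=
      (pv_isIn_singleton ':' _).mpr hms
    simp only [hiin, if_true, pv_splitOnMax_one, hms]
    rw [pv_M2 l ':' rfl, pv_M3 l ':' rfl]
  · have hms : ':' ∉ PySem.Chars.strip l := fun h => hm ((pv_mem_strip l ':' rfl).mp h)
    rw [if_neg (by rw [pv_isIn_singleton_false ':' _ hms]; exact Bool.false_ne_true)]
    have h1 : l.takeWhile (· != ':') = l := by
      rw [List.takeWhile_eq_self_iff]
      intro x hx; simp only [bne_iff_ne, ne_eq]; intro e; exact hm (e ▸ hx)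
    have h2 : l.dropWhile (· != ':') = [] := by
      rw [List.dropWhile_eq_nil_iff]
      intro x hx; simp only [bne_iff_ne, ne_eq]; intro e; exact hm (e ▸ hx)
    rw [h1, h2, pv_strip_idem]
    rfl

theorem pv_cascadeA_eq (p : List Char) : pvCascadeA (PySem.Chars.strip p) = pvEmit p := by
  unfold pvCascadeA pvEmit
  dsimp only
  by_cases he : '=' ∈ p
  · have hes : '=' ∈ PySem.Chars.strip p := (pv_mem_strip p '=' rfl).mpr he
    have hiin : PySem.Chars.isIn ['='] (PySem.Chars.strip p) = true :=
      (pv_isIn_singleton '=' _).mpr hes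
    simp only [hiin, if_true, pv_splitOnMax_one, hes]
    rw [pv_M2 p '=' rfl, pv_M3 p '=' rfl]
    have hc := pv_colon (p.takeWhile (· != '='))
    simp only [pv_splitOnMax_one] at hc
    rw [hc]
  · have hes : '=' ∉ PySem.Chars.strip p := fun h => he ((pv_mem_strip p '=' rfl).mp h)
    have hiin : PySem.Chars.isIn ['='] (PySem.Chars.strip p) = false :=
      pv_isIn_singleton_false '=' _ hes
    simp only [hiin, Bool.false_eq_true, if_false]
    have h1 : p.takeWhile (· != '=') = p := by
      rw [List.takeWhile_eq_self_iff]
      intro x hx; simp only [bne_iff_ne, ne_eq]; intro e; exact he (e ▸ hx)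
    have h2 : p.dropWhile (· != '=') = [] := by
      rw [List.dropWhile_eq_nil_iff]
      intro x hx; simp only [bne_iff_ne, ne_eq]; intro e; exact he (e ▸ hx)
    simp only [h1, h2, List.drop_nil]
    have hc := pv_colon p
    rw [hc]
    rfl


def pvEmitL (p : List Char) : List (String × String × String) :=
  if p.any (fun ch => !PySem.Chars.isspace ch) then [pvEmit p] else []

theorem pv_step_comma (acc : List (String × String × String)) (n t d : List Char) (m : Nat) (seen : Bool) :
    pvStepB (acc, n, t, d, m, seen) ',' =
      (if seen then
          acc ++ [(String.ofList (PySem.Chars.strip n), String.ofList (PySem.Chars.strip t),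
                   String.ofList (PySem.Chars.strip d))]
        else acc, [], [], [], 0, false) := by
  simp [pvStepB]

theorem pv_step_eq (acc : List (String × String × String)) (n t d : List Char) (m : Nat) (seen : Bool)
    (hm : m < 2) :
    pvStepB (acc, n, t, d, m, seen) '=' = (acc, n, t, d, 2, true) := by
  simp [pvStepB, hm]
  exact Or.inr (by decide)

theorem pv_step_eq0 (acc : List (String × String × String)) (n t d : List Char) (seen : Bool) :
    pvStepB (acc, n, t, d, 0, seen) '=' = (acc, n, t, d, 2, true) := pv_step_eq acc n t d 0 seen (by omega)

theorem pv_step_eq1 (acc : List (String × String × String)) (n t d : List Char) (seen : Bool) :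
    pvStepB (acc, n, t, d, 1, seen) '=' = (acc, n, t, d, 2, true) := pv_step_eq acc n t d 1 seen (by omega)

theorem pv_step_colon0 (acc : List (String × String × String)) (n t d : List Char) (seen : Bool) :
    pvStepB (acc, n, t, d, 0, seen) ':' = (acc, n, t, d, 1, true) := by
  simp [pvStepB]
  exact Or.inr (by decide)

theorem pv_B0 (p : List Char) (h : ∀ ch ∈ p, ch ≠ ',' ∧ ch ≠ '=' ∧ ch ≠ ':')
    (acc : List (String × String × String)) (n t d : List Char) (seen : Bool) :
    List.foldl pvStepB (acc, n, t, d, 0, seen) p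
      = (acc, n ++ p, t, d, 0, seen || p.any (fun c => !PySem.Chars.isspace c)) := by
  induction p generalizing n seen with
  | nil => simp
  | cons a r ih =>
    obtain ⟨h1, h2, h3⟩ := h a (List.mem_cons_self)
    rw [List.foldl_cons]
    have hstep : pvStepB (acc, n, t, d, 0, seen) a
        = (acc, n ++ [a], t, d, 0, seen || !PySem.Chars.isspace a) := by
      simp [pvStepB, h1, h2, h3]
    rw [hstep, ih (fun ch hch => h ch (List.mem_cons_of_mem _ hch))]
    simp [Bool.or_assoc]

theorem pv_B1 (p : List Char) (h : ∀ ch ∈ p, ch ≠ ',' ∧ ch ≠ '=')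
    (acc : List (String × String × String)) (n t d : List Char) (seen : Bool) :
    List.foldl pvStepB (acc, n, t, d, 1, seen) p
      = (acc, n, t ++ p, d, 1, seen || p.any (fun c => !PySem.Chars.isspace c)) := by
  induction p generalizing t seen with
  | nil => simp
  | cons a r ih =>
    obtain ⟨h1, h2⟩ := h a (List.mem_cons_self)
    rw [List.foldl_cons]
    have hstep : pvStepB (acc, n, t, d, 1, seen) a
        = (acc, n, t ++ [a], d, 1, seen || !PySem.Chars.isspace a) := by
      simp [pvStepB, h1, h2]
    rw [hstep, ih (fun ch hch => h ch (List.mem_cons_of_mem _ hch))]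
    simp [Bool.or_assoc]

theorem pv_B2 (p : List Char) (h : ∀ ch ∈ p, ch ≠ ',')
    (acc : List (String × String × String)) (n t d : List Char) (seen : Bool) :
    List.foldl pvStepB (acc, n, t, d, 2, seen) p
      = (acc, n, t, d ++ p, 2, seen || p.any (fun c => !PySem.Chars.isspace c)) := by
  induction p generalizing d seen with
  | nil => simp
  | cons a r ih =>
    have h1 := h a (List.mem_cons_self)
    rw [List.foldl_cons]
    have hstep : pvStepB (acc, n, t, d, 2, seen) a
        = (acc, n, t, d ++ [a], 2, seen || !PySem.Chars.isspace a) := by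
      simp [pvStepB, h1]
    rw [hstep, ih (fun ch hch => h ch (List.mem_cons_of_mem _ hch))]
    simp [Bool.or_assoc]

theorem pv_any_of_mem {p : List Char} {c : Char} (h : c ∈ p) (hc : PySem.Chars.isspace c = false) :
    (p.any fun ch => !PySem.Chars.isspace ch) = true :=
  List.any_eq_true.mpr ⟨c, h, by simp [hc]⟩

theorem pv_takeWhile_not_mem (p : List Char) (c : Char) (h : c ∉ p) : p.takeWhile (· != c) = p := by
  rw [List.takeWhile_eq_self_iff]
  intro x hx; simp only [bne_iff_ne, ne_eq]; intro e; exact h (e ▸ hx)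

theorem pv_dropWhile_not_mem (p : List Char) (c : Char) (h : c ∉ p) : p.dropWhile (· != c) = [] := by
  rw [List.dropWhile_eq_nil_iff]
  intro x hx; simp only [bne_iff_ne, ne_eq]; intro e; exact h (e ▸ hx)

theorem pv_BP (p : List Char) (hcomma : ',' ∉ p) (acc : List (String × String × String)) :
    List.foldl pvStepB (acc, [], [], [], 0, false) (p ++ [','])
      = (acc ++ pvEmitL p, [], [], [], 0, false) := by
  rw [List.foldl_append]
  by_cases he : '=' ∈ p
  · -- p = l ++ '=' :: d0
    have hp : p = p.takeWhile (· != '=') ++ '=' :: (p.dropWhile (· != '=')).drop 1 := by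
      conv_lhs => rw [← List.takeWhile_append_dropWhile (p := (· != '=')) (l := p)]
      rw [← pv_dropWhile_mem p '=' he]
    have hld : ∀ ch ∈ (p.dropWhile (· != '=')).drop 1, ch ≠ ',' :=
      fun ch hch e => hcomma (e ▸ ((List.drop_sublist _ _).trans (List.dropWhile_sublist _)).mem hch)
    have hleq : '=' ∉ p.takeWhile (· != '=') := pv_not_mem_takeWhile p '='
    have hlp : ∀ ch ∈ p.takeWhile (· != '='), ch ∈ p := fun ch hch => (List.takeWhile_sublist _).mem hch
    have hanyp : (p.any fun ch => !PySem.Chars.isspace ch) = true := pv_any_of_mem he rfl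
    conv_lhs => rw [hp]
    rw [List.foldl_append, List.foldl_cons]
    by_cases hcl : ':' ∈ p.takeWhile (· != '=')
    · have hl : p.takeWhile (· != '=') =
          (p.takeWhile (· != '=')).takeWhile (· != ':') ++
            ':' :: ((p.takeWhile (· != '=')).dropWhile (· != ':')).drop 1 := by
        conv_lhs => rw [← List.takeWhile_append_dropWhile (p := (· != ':')) (l := p.takeWhile (· != '='))]
        rw [← pv_dropWhile_mem _ ':' hcl]
      have hn0 : ∀ ch ∈ (p.takeWhile (· != '=')).takeWhile (· != ':'), ch ≠ ',' ∧ ch ≠ '=' ∧ ch ≠ ':' := by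
        intro ch hch
        refine ⟨fun e => hcomma (hlp _ ((List.takeWhile_sublist _).mem (e ▸ hch))), ?_, ?_⟩
        · exact fun e => hleq ((List.takeWhile_sublist _).mem (e ▸ hch))
        · exact fun e => pv_not_mem_takeWhile _ ':' (e ▸ hch)
      have ht0 : ∀ ch ∈ ((p.takeWhile (· != '=')).dropWhile (· != ':')).drop 1, ch ≠ ',' ∧ ch ≠ '=' := by
        intro ch hch
        have hchl : ch ∈ p.takeWhile (· != '=') :=
          ((List.drop_sublist _ _).trans (List.dropWhile_sublist _)).mem hch
        exact ⟨fun e => hcomma (hlp _ (e ▸ hchl)), fun e => hleq (e ▸ hchl)⟩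
      conv_lhs => rw [hl]
      simp only [List.foldl_append, List.foldl_cons, List.foldl_nil, pv_B0 _ hn0,
        List.nil_append, Bool.false_or, pv_step_colon0, pv_B1 _ ht0, Bool.true_or,
        pv_step_eq1, pv_B2 _ hld, pv_step_comma, if_true]
      simp only [pvEmitL, hanyp, if_true, pvEmit]
    · have hl0 : (p.takeWhile (· != '=')).takeWhile (· != ':') = p.takeWhile (· != '=') :=
        pv_takeWhile_not_mem _ ':' hcl
      have hl1 : (p.takeWhile (· != '=')).dropWhile (· != ':') = [] :=
        pv_dropWhile_not_mem _ ':' hcl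
      have hn0 : ∀ ch ∈ p.takeWhile (· != '='), ch ≠ ',' ∧ ch ≠ '=' ∧ ch ≠ ':' := by
        intro ch hch
        exact ⟨fun e => hcomma (hlp _ (e ▸ hch)), fun e => hleq (e ▸ hch), fun e => hcl (e ▸ hch)⟩
      simp only [List.foldl_append, List.foldl_cons, List.foldl_nil, pv_B0 _ hn0,
        List.nil_append, Bool.false_or, pv_step_eq0, pv_B2 _ hld, pv_step_comma, if_true]
      simp only [pvEmitL, hanyp, if_true, pvEmit, hl0, hl1, List.drop_nil]
      simp
  · have hd : p.dropWhile (· != '=') = [] := pv_dropWhile_not_mem p '=' he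
    have hte : p.takeWhile (· != '=') = p := pv_takeWhile_not_mem p '=' he
    by_cases hcl : ':' ∈ p
    · have hl : p = p.takeWhile (· != ':') ++ ':' :: (p.dropWhile (· != ':')).drop 1 := by
        conv_lhs => rw [← List.takeWhile_append_dropWhile (p := (· != ':')) (l := p)]
        rw [← pv_dropWhile_mem _ ':' hcl]
      have hn0 : ∀ ch ∈ p.takeWhile (· != ':'), ch ≠ ',' ∧ ch ≠ '=' ∧ ch ≠ ':' := by
        intro ch hch
        refine ⟨fun e => hcomma ((List.takeWhile_sublist _).mem (e ▸ hch)), ?_, ?_⟩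
        · exact fun e => he ((List.takeWhile_sublist _).mem (e ▸ hch))
        · exact fun e => pv_not_mem_takeWhile _ ':' (e ▸ hch)
      have ht0 : ∀ ch ∈ (p.dropWhile (· != ':')).drop 1, ch ≠ ',' ∧ ch ≠ '=' := by
        intro ch hch
        have hchp : ch ∈ p := ((List.drop_sublist _ _).trans (List.dropWhile_sublist _)).mem hch
        exact ⟨fun e => hcomma (e ▸ hchp), fun e => he (e ▸ hchp)⟩
      have hanyp : (p.any fun ch => !PySem.Chars.isspace ch) = true := pv_any_of_mem hcl rfl
      conv_lhs => rw [hl]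
      simp only [List.foldl_append, List.foldl_cons, List.foldl_nil, pv_B0 _ hn0,
        List.nil_append, Bool.false_or, pv_step_colon0, pv_B1 _ ht0, Bool.true_or,
        pv_step_comma, if_true]
      simp only [pvEmitL, hanyp, if_true, pvEmit, hte, hd, List.drop_nil]
      -- closed by previous simp
    · have hn0 : ∀ ch ∈ p, ch ≠ ',' ∧ ch ≠ '=' ∧ ch ≠ ':' := by
        intro ch hch
        exact ⟨fun e => hcomma (e ▸ hch), fun e => he (e ▸ hch), fun e => hcl (e ▸ hch)⟩
      simp only [List.foldl_append, List.foldl_cons, List.foldl_nil, pv_B0 _ hn0,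
        List.nil_append, Bool.false_or, pv_step_comma]
      have h0 : p.takeWhile (· != ':') = p := pv_takeWhile_not_mem _ ':' hcl
      have h1 : p.dropWhile (· != ':') = [] := pv_dropWhile_not_mem _ ':' hcl
      simp only [pvEmitL, pvEmit, hte, hd, h0, h1, List.drop_nil]
      by_cases hany : (p.any fun ch => !PySem.Chars.isspace ch) = true
      · simp [hany]
      · simp only [Bool.not_eq_true] at hany
        simp [hany]

def pvRef (cs : List Char) : List (String × String × String) :=
  (pvParts ',' cs).flatMap pvEmitL

def pvJoin (c : Char) : List (List Char) → List Char
  | [] => []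
  | p :: ps => p ++ ps.flatMap (fun q => c :: q)

theorem pv_parts_no_comma (c : Char) (cs : List Char) : ∀ p ∈ pvParts c cs, c ∉ p := by
  induction cs with
  | nil => simp [pvParts]
  | cons a r ih =>
    intro p hp
    simp only [pvParts] at hp
    split_ifs at hp with ha
    · rcases List.mem_cons.mp hp with h | h
      · subst h; simp
      · exact ih p h
    · cases hq : pvParts c r with
      | nil => exact absurd hq (pv_pvParts_ne_nil c r)
      | cons q qs =>
        rw [hq] at hp
        rcases List.mem_cons.mp hp with h | h
        · subst h
          intro hm
          rcases List.mem_cons.mp hm with h' | h'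
          · exact ha h'.symm
          · exact ih q (hq ▸ List.mem_cons_self) h'
        · exact ih p (hq ▸ List.mem_cons_of_mem q h)

theorem pv_join_parts (c : Char) (cs : List Char) : pvJoin c (pvParts c cs) = cs := by
  induction cs with
  | nil => simp [pvParts, pvJoin]
  | cons a r ih =>
    simp only [pvParts]
    split_ifs with ha
    · subst ha
      cases hq : pvParts a r with
      | nil => exact absurd hq (pv_pvParts_ne_nil a r)
      | cons q qs =>
        rw [hq] at ih
        simp only [pvJoin, List.flatMap_cons, List.nil_append] at ih ⊢
        rw [← ih]; simp
    · cases hq : pvParts c r with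
      | nil => exact absurd hq (pv_pvParts_ne_nil c r)
      | cons q qs =>
        rw [hq] at ih
        simp only [pvJoin, List.cons_append] at ih ⊢
        rw [ih]

theorem pv_BJ (ps : List (List Char)) (hps : ps ≠ []) (hc : ∀ p ∈ ps, ',' ∉ p)
    (acc : List (String × String × String)) :
    List.foldl pvStepB (acc, [], [], [], 0, false) (pvJoin ',' ps ++ [','])
      = (acc ++ ps.flatMap pvEmitL, [], [], [], 0, false) := by
  induction ps generalizing acc with
  | nil => exact absurd rfl hps
  | cons p ps ih =>
    cases ps with
    | nil =>
      simp only [pvJoin, List.flatMap_nil, List.append_nil, List.flatMap_cons]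
      exact pv_BP p (hc p List.mem_cons_self) acc
    | cons q rest =>
      have hsplit : pvJoin ',' (p :: q :: rest) ++ [','] =
          (p ++ [',']) ++ (pvJoin ',' (q :: rest) ++ [',']) := by
        simp [pvJoin, List.flatMap_cons]
      rw [hsplit, List.foldl_append, pv_BP p (hc p List.mem_cons_self) acc,
        ih (by simp) (fun r hr => hc r (List.mem_cons_of_mem p hr))]
      simp [List.flatMap_cons]


theorem pv_parts_single (c : Char) (cs : List Char) (h : c ∉ cs) : pvParts c cs = [cs] := by
  induction cs with
  | nil => rfl
  | cons a r ih =>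
    have ha : ¬ a = c := fun e => h (by simp [e])
    simp only [pvParts, if_neg ha, ih (fun hm => h (List.mem_cons_of_mem a hm))]

theorem pv_foldA (ps : List (List Char)) (acc : List (String × String × String)) :
    (ps.map PySem.Chars.strip).foldl
        (fun parsed part => if part = [] then parsed else parsed ++ [pvCascadeA part]) acc
      = acc ++ ps.flatMap pvEmitL := by
  induction ps generalizing acc with
  | nil => simp
  | cons p ps ih =>
    rw [List.map_cons, List.foldl_cons, List.flatMap_cons]
    by_cases hp : PySem.Chars.strip p = []
    · have hany : (p.any fun ch => !PySem.Chars.isspace ch) = false :=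
        (pv_strip_eq_nil_iff p).mp hp
      rw [if_pos hp, ih]
      simp [pvEmitL, hany]
    · have hany : (p.any fun ch => !PySem.Chars.isspace ch) = true := by
        by_contra hb
        exact hp ((pv_strip_eq_nil_iff p).mpr (by simpa using hb))
      rw [if_neg hp, ih, pv_cascadeA_eq]
      simp [pvEmitL, hany]


theorem pv_a_eq_ref (cs : List Char) :
    parse_gdscript_parameters_py (String.ofList cs) = pvRef cs := by
  unfold parse_gdscript_parameters_py
  rw [String.toList_ofList]
  by_cases hg : PySem.Chars.strip cs = []
  · rw [if_pos hg]
    have hany : (cs.any fun ch => !PySem.Chars.isspace ch) = false := (pv_strip_eq_nil_iff cs).mp hg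
    have hnc : ',' ∉ cs := by
      intro hm
      rw [List.any_eq_false] at hany
      exact hany ',' hm (by decide)
    rw [pvRef, pv_parts_single ',' cs hnc]
    simp [pvEmitL, hany]
  · rw [if_neg hg]
    dsimp only
    rw [pv_splitOn_eq_pvParts, pv_foldA]
    rfl

theorem pv_b_eq_ref (cs : List Char) :
    parse_gdscript_parameters_py_alt (String.ofList cs) = pvRef cs := by
  unfold parse_gdscript_parameters_py_alt
  rw [String.toList_ofList]
  conv_lhs => rw [← pv_join_parts ',' cs]
  rw [pv_BJ (pvParts ',' cs) (pv_pvParts_ne_nil ',' cs) (pv_parts_no_comma ',' cs) []]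
  rfl

theorem pv_final (parameters : String) :
    parse_gdscript_parameters_py parameters = parse_gdscript_parameters_py_alt parameters := by
  have h1 := pv_a_eq_ref parameters.toList
  have h2 := pv_b_eq_ref parameters.toList
  rw [String.ofList_toList] at h1 h2
  rw [h1, h2]

-- ===== VERDICT (by name: the statement is the Claim_ definition above) =====
theorem parse_gdscript_parameters_py_spec : Claim_equal_parse_gdscript_parameters_py := by
  intro parameters _
  unfold Spec_parse_gdscript_parameters_py
  exact pv_final parameters
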